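-- pv_equiv track=rewrite | github.com/williamcwi/Google-Competition | codejam/2021/Round 1A/append_sort.py | solve
-- ===== SOURCE A (Python) =====
-- def solve(n, x):
--     result = 0
--     for i in range(1, n):
--         if x[i] <= x[i-1]:
--             if len(str(x[i])) == len(str(x[i-1])):
--                 x[i] = int(str(x[i]) + '0')
--                 result += 1
--             else:
--                 k = len(str(x[i-1])) - len(str(x[i]))
--
--                 if x[i] * (10**k) > x[i-1]:
--                     x[i] = x[i] * (10**k)
--                     result += k
--
--                 elif int(str(x[i]) + ('9' * k)) > x[i-1]:
--                     x[i] = x[i-1] + 1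
--                     result += k
--                 else:
--                     x[i] = x[i] * (10 ** (k+1))
--                     result += k+1
--     return result
-- ===== SOURCE B (Python) =====
-- def solve(n, x):
--     result = 0
--     for i in range(1, n):
--         prev = x[i - 1]
--         if x[i] <= prev:
--             k = 1
--             while True:
--                 low = x[i] * 10 ** k
--                 high = low + 10 ** k - 1
--                 if low > prev:
--                     x[i] = low
--                     break
--                 if high > prev:
--                     x[i] = prev + 1
--                     break
--                 k += 1
--             result += k
--     return result
-- ===== Notes on version B (the rewrite author's own statement) =====
-- stated objective: simpler
-- what changed: A picks the number of appended digits by a three-way case analysis on decimal string lengths (len(str), int(str(..)+'0'/'9'*k)); B never converts to strings: it searches k = 1, 2, ... arithmetically, computing the smallest (low = x[i]*10**k) and largest (high = low + 10**k - 1) value reachable by appending k digits and stopping at the first k that can exceed the previous element.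
-- outside the precondition, e.g. on solve(2, [-5, -7]): A returns 1, B does not finish within the time limit; on solve(3, [0, 0, 1]): A returns 1, B returns 2
import Mathlib
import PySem

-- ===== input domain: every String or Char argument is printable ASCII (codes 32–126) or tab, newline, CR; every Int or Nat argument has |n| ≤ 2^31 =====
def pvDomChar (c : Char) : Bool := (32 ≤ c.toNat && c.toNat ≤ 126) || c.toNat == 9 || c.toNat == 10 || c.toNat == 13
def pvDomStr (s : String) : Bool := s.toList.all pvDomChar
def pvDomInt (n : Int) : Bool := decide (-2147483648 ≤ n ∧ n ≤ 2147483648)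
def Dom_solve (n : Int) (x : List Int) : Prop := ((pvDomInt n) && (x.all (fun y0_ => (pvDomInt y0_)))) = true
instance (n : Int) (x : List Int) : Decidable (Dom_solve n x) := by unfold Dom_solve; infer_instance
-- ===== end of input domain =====

-- B replaces A's decimal-string case analysis (len(str(..)), int(str(..)+'0'/'9'*k)) by a purely
-- arithmetic search over the number k of appended digits.  Both Pythons mutate x in place in the
-- same way on every input admitted by Pre_; the equivalence proved here is about the return value.

-- ===== PORT A =====
-- digit-string value, and int(s) hand-ported for the strings this program builds: str(m) followed
-- by decimal digits (optional leading '-', then digits only).  Exact on those strings; Python's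
-- int() also accepts whitespace/'+'/'_' which never occur here.
def pvStrVal (cs : List Char) : Nat := cs.foldl (fun a c => a * 10 + (c.toNat - 48)) 0
def pvInt (cs : List Char) : Int :=
  match cs with
  | '-' :: ds => -(pvStrVal ds : Int)
  | ds => (pvStrVal ds : Int)

def solveStepA (st : List Int × Int) (i : Int) : List Int × Int :=
  let xs := st.1
  let cur := PySem.List.pyGetD xs i 0
  let prev := PySem.List.pyGetD xs (i - 1) 0
  if cur ≤ prev then
    if (PySem.Int.toChars cur).length = (PySem.Int.toChars prev).length then
      (PySem.List.pySetD xs i (pvInt (PySem.Int.toChars cur ++ ['0'])), st.2 + 1)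
    else
      -- Python: k = len(str(x[i-1])) - len(str(x[i])); under Pre_ it is ≥ 0, where Nat subtraction
      -- is exact (for k < 0 Python would compute floats, which Pre_ excludes).
      let k : Nat := (PySem.Int.toChars prev).length - (PySem.Int.toChars cur).length
      if cur * 10 ^ k > prev then
        (PySem.List.pySetD xs i (cur * 10 ^ k), st.2 + (k : Int))
      else if pvInt (PySem.Int.toChars cur ++ List.replicate k '9') > prev then
        (PySem.List.pySetD xs i (prev + 1), st.2 + (k : Int))
      else
        (PySem.List.pySetD xs i (cur * 10 ^ (k + 1)), st.2 + (k : Int) + 1)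
  else st

def solve (n : Int) (x : List Int) : Int :=
  ((PySem.List.pyRange 1 n).foldl solveStepA (x, 0)).2

-- ===== PORT B =====
-- Source B's 'while True' search over k; the Nat fuel argument only makes the loop total (never
-- exhausted under Pre_, see solveAppend_eval); when it runs out we return the loop's own
-- prev+1 branch, a value the claim never relies on.
def solveAppend (prev cur : Int) : Nat → Nat → Int × Nat
  | k, 0 => (prev + 1, k)
  | k, fuel + 1 =>
    let low := cur * 10 ^ k
    let high := low + 10 ^ k - 1
    if low > prev then (low, k)
    else if high > prev then (prev + 1, k)
    else solveAppend prev cur (k + 1) fuel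

def solveStepB (st : List Int × Int) (i : Int) : List Int × Int :=
  let xs := st.1
  let prev := PySem.List.pyGetD xs (i - 1) 0
  if PySem.List.pyGetD xs i 0 ≤ prev then
    let r := solveAppend prev (PySem.List.pyGetD xs i 0) 1 (prev.toNat + 1)
    (PySem.List.pySetD xs i r.1, st.2 + (r.2 : Int))
  else st

def solve_alt (n : Int) (x : List Int) : Int :=
  ((PySem.List.pyRange 1 n).foldl solveStepB (x, 0)).2

-- ===== PRECONDITION & SPEC =====
-- Pre_ excludes calls (with n ≥ 2) whose first n values contain a non-positive number — the Code
-- Jam problem guarantees positive x_i; on non-positive values A's digit-string appends silently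
-- stop making the sequence increasing while B's append search need not terminate — and calls with
-- n > len(x), on which A raises IndexError.
def Pre_solve (n : Int) (x : List Int) : Prop :=
  n ≤ 1 ∨ (n ≤ (x.length : Int) ∧ ∀ j < n.toNat, 1 ≤ x.getD j 0)
instance (n : Int) (x : List Int) : Decidable (Pre_solve n x) := by unfold Pre_solve; infer_instance

def pvWitness_solve : Int × List Int := (3, [1, 1, 5])

def Spec_solve (n : Int) (x : List Int) (out : Int) : Prop := out = solve_alt n x
instance (n : Int) (x : List Int) (out : Int) : Decidable (Spec_solve n x out) := by unfold Spec_solve; infer_instance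

-- ===== CLAIM (what is proved, stated in full; the proofs are below) =====
def Claim_equal_solve : Prop := ∀ (n : Int) (x : List Int), Dom_solve n x → Pre_solve n x → Spec_solve n x (solve n x)

-- ===== LEMMAS AND PROOFS =====

def pvDigs (n : Nat) : List Char :=
  if _h : n < 10 then [Nat.digitChar n]
  else pvDigs (n / 10) ++ [Nat.digitChar (n % 10)]
decreasing_by exact Nat.div_lt_self (by omega) (by omega)

theorem pvDigitChar_toNat {d : Nat} (h : d < 10) : (Nat.digitChar d).toNat - 48 = d := by
  interval_cases d <;> decide

theorem pvDigs_spec (n : Nat) :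
    (1 ≤ (pvDigs n).length) ∧
    (∀ acc : Nat, (pvDigs n).foldl (fun a c => a * 10 + (c.toNat - 48)) acc
        = acc * 10 ^ (pvDigs n).length + n) ∧
    n < 10 ^ (pvDigs n).length ∧
    (1 ≤ n → 10 ^ ((pvDigs n).length - 1) ≤ n) ∧
    (∃ d t, d < 10 ∧ pvDigs n = Nat.digitChar d :: t) := by
  induction n using pvDigs.induct with
  | case1 n h =>
    rw [pvDigs]; simp only [dif_pos h]
    refine ⟨by simp, ?_, by simpa using h, ?_, n, [], h, rfl⟩
    · intro acc; simp [pvDigitChar_toNat h]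
    · intro h1; simpa using h1
  | case2 n h ih =>
    rw [pvDigs]; simp only [dif_neg h]
    obtain ⟨hl, hv, hub, hlb, d, t, hd, hdt⟩ := ih
    have hq : 1 ≤ n / 10 := by omega
    have hdm := Nat.div_add_mod n 10
    refine ⟨by simp, ?_, ?_, ?_, ?_⟩
    · intro acc
      rw [List.foldl_append, hv acc]
      simp only [List.foldl_cons, List.foldl_nil, List.length_append, List.length_cons,
        List.length_nil, pvDigitChar_toNat (Nat.mod_lt n (by omega)), pow_succ]
      ring_nf
      omega
    · simp only [List.length_append, List.length_cons, List.length_nil, pow_succ]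
      omega
    · intro _
      simp only [List.length_append, List.length_cons, List.length_nil]
      have h10 : 10 ^ ((pvDigs (n/10)).length - 1) ≤ n / 10 := hlb hq
      have he : (pvDigs (n/10)).length + 1 - 1 = ((pvDigs (n/10)).length - 1) + 1 := by omega
      rw [he, pow_succ]
      omega
    · exact ⟨d, t ++ [Nat.digitChar (n % 10)], hd, by rw [hdt]; simp⟩

theorem pvToDigitsCore_eq (f : Nat) : ∀ (n : Nat) (ds : List Char), n < f →
    Nat.toDigitsCore 10 f n ds = pvDigs n ++ ds := by
  induction f with
  | zero => intro n ds h; omega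
  | succ f ih =>
    intro n ds h
    rw [Nat.toDigitsCore]
    by_cases h10 : n < 10
    · have : n / 10 = 0 := by omega
      simp only [this]
      rw [pvDigs]
      simp [Nat.mod_eq_of_lt h10, dif_pos h10]
    · have hne : ¬ n / 10 = 0 := by omega
      simp only [hne]
      rw [ih (n / 10) _ (by omega)]
      conv_rhs => rw [pvDigs]
      simp [dif_neg h10]

theorem pvToDigits_eq (n : Nat) : Nat.toDigits 10 n = pvDigs n := by
  have := pvToDigitsCore_eq (n + 1) n [] (by omega)
  simpa [Nat.toDigits] using this

theorem pvToChars_nonneg {v : Int} (h : 0 ≤ v) :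
    PySem.Int.toChars v = pvDigs v.toNat := by
  simp [PySem.Int.toChars, not_lt.2 h, pvToDigits_eq]

theorem pvRepNines (k : Nat) : ∀ acc : Nat,
    (List.replicate k '9').foldl (fun a c => a * 10 + (c.toNat - 48)) acc
      = acc * 10 ^ k + (10 ^ k - 1) := by
  induction k with
  | zero => intro acc; simp
  | succ k ih =>
    intro acc
    rw [List.replicate_succ, List.foldl_cons, ih]
    have h1 : (1:Nat) ≤ 10 ^ k := Nat.one_le_pow _ _ (by omega)
    have h9 : ('9'.toNat - 48) = 9 := rfl
    simp only [h9, pow_succ]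
    ring_nf
    omega

theorem pvInt_digs_append (m : Nat) (sfx : List Char) :
    pvInt (pvDigs m ++ sfx) = (pvStrVal (pvDigs m ++ sfx) : Nat) := by
  obtain ⟨-, -, -, -, d, t, hd, hdt⟩ := pvDigs_spec m
  rw [hdt]
  have hne : Nat.digitChar d ≠ '-' := by interval_cases d <;> decide
  unfold pvInt
  split
  · rename_i heq; rw [List.cons_append] at heq; exact absurd (by exact (List.cons.injEq _ _ _ _ ▸ heq).1) (by simp [hne])
  · rfl

theorem pvInt_zero_append (m : Nat) : pvInt (pvDigs m ++ ['0']) = (m : Int) * 10 := by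
  rw [pvInt_digs_append]
  unfold pvStrVal
  rw [List.foldl_append]
  have := (pvDigs_spec m).2.1 0
  rw [this]
  simp

theorem pvInt_nines_append (m : Nat) (k : Nat) :
    pvInt (pvDigs m ++ List.replicate k '9') = (m : Int) * 10 ^ k + ((10 : Int) ^ k - 1) := by
  rw [pvInt_digs_append]
  unfold pvStrVal
  rw [List.foldl_append]
  have h1 := (pvDigs_spec m).2.1 0
  rw [h1]
  simp only [zero_mul, zero_add]
  rw [pvRepNines]
  have h2 : (1:Nat) ≤ 10 ^ k := Nat.one_le_pow _ _ (by omega)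
  push_cast [h2]
  ring

theorem pvLen_bounds {v : Int} (h : 1 ≤ v) :
    (10 : Int) ^ ((pvDigs v.toNat).length - 1) ≤ v ∧ v < 10 ^ (pvDigs v.toNat).length := by
  obtain ⟨-, -, hub, hlb, -⟩ := pvDigs_spec v.toNat
  have h1 : 1 ≤ v.toNat := by omega
  have hl := hlb h1
  constructor
  · calc ((10:Int)) ^ ((pvDigs v.toNat).length - 1) = ((10 ^ ((pvDigs v.toNat).length - 1) : Nat) : Int) := by push_cast; ring
      _ ≤ (v.toNat : Int) := by exact_mod_cast hl
      _ = v := by omega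
  · calc v = (v.toNat : Int) := by omega
      _ < ((10 ^ (pvDigs v.toNat).length : Nat) : Int) := by exact_mod_cast hub
      _ = 10 ^ (pvDigs v.toNat).length := by push_cast; ring

theorem pvLen_pos (m : Nat) : 1 ≤ (pvDigs m).length := (pvDigs_spec m).1

theorem pvLen_mono {a b : Int} (ha : 1 ≤ a) (hab : a ≤ b) :
    (pvDigs a.toNat).length ≤ (pvDigs b.toNat).length := by
  have hb : 1 ≤ b := le_trans ha hab
  have h1 := (pvLen_bounds ha).1
  have h2 := (pvLen_bounds hb).2
  have : (10:Int) ^ ((pvDigs a.toNat).length - 1) < 10 ^ (pvDigs b.toNat).length := by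
    calc (10:Int) ^ ((pvDigs a.toNat).length - 1) ≤ a := h1
      _ ≤ b := hab
      _ < _ := h2
  have := (pow_lt_pow_iff_right₀ (by norm_num : (1:Int) < 10)).1 this
  have hpos := pvDigs_spec a.toNat |>.1
  omega

theorem pvLen_le_self {v : Int} (h : 1 ≤ v) : ((pvDigs v.toNat).length : Int) ≤ v := by
  have h1 := (pvLen_bounds h).1
  have h2 : ((pvDigs v.toNat).length : Int) ≤ 10 ^ ((pvDigs v.toNat).length - 1) := by
    have hpos := pvDigs_spec v.toNat |>.1
    have hn : ∀ d : Nat, (d : Int) + 1 ≤ 10 ^ d := by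
      intro d
      induction d with
      | zero => norm_num
      | succ d ih => rw [pow_succ]; push_cast; nlinarith [pow_pos (by norm_num : (0:Int) < 10) d]
    have := hn ((pvDigs v.toNat).length - 1)
    have hc : (((pvDigs v.toNat).length - 1 : Nat) : Int) + 1 = ((pvDigs v.toNat).length : Int) := by omega
    omega
  omega

theorem solveAppend_eval (prev cur : Int) (K : Nat) (_hK : 1 ≤ K)
    (hskip : ∀ j, 1 ≤ j → j < K → cur * 10 ^ j + ((10 : Int) ^ j - 1) ≤ prev)
    (hstop : cur * 10 ^ K + ((10 : Int) ^ K - 1) > prev) :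
    ∀ f k, 1 ≤ k → k ≤ K → K < k + f →
      solveAppend prev cur k f
        = (if cur * 10 ^ K > prev then (cur * 10 ^ K, K) else (prev + 1, K)) := by
  intro f
  induction f with
  | zero => intro k h1 h2 h3; omega
  | succ f ih =>
    intro k h1 h2 h3
    rw [solveAppend]
    by_cases hkK : k = K
    · rw [hkK]
      by_cases hlow : cur * 10 ^ K > prev
      · rw [if_pos hlow, if_pos hlow]
      · rw [if_neg hlow, if_pos (by omega : cur * 10 ^ K + 10 ^ K - 1 > prev), if_neg hlow]
    · have hk2 : k < K := by omega
      have hs := hskip k h1 hk2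
      have hp1 : (0:Int) < 10 ^ k := pow_pos (by norm_num) k
      rw [if_neg (by omega), if_neg (by omega)]
      exact ih (k + 1) (by omega) (by omega) (by omega)

theorem inner_eq (prev cur : Int) (hc : 1 ≤ cur) (hp : cur ≤ prev) :
    solveAppend prev cur 1 (prev.toNat + 1) =
      (if (pvDigs cur.toNat).length = (pvDigs prev.toNat).length then
         (pvInt (pvDigs cur.toNat ++ ['0']), 1)
       else
         if cur * 10 ^ ((pvDigs prev.toNat).length - (pvDigs cur.toNat).length) > prev then
           (cur * 10 ^ ((pvDigs prev.toNat).length - (pvDigs cur.toNat).length),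
            (pvDigs prev.toNat).length - (pvDigs cur.toNat).length)
         else if pvInt (pvDigs cur.toNat ++ List.replicate ((pvDigs prev.toNat).length - (pvDigs cur.toNat).length) '9') > prev then
           (prev + 1, (pvDigs prev.toNat).length - (pvDigs cur.toNat).length)
         else
           (cur * 10 ^ (((pvDigs prev.toNat).length - (pvDigs cur.toNat).length) + 1),
            ((pvDigs prev.toNat).length - (pvDigs cur.toNat).length) + 1)) := by
  have hp1 : 1 ≤ prev := le_trans hc hp
  have hcb := pvLen_bounds hc
  have hpb := pvLen_bounds hp1
  have hDcp := pvLen_mono hc hp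
  have hDc1 := pvLen_pos cur.toNat
  have hDp1 := pvLen_pos prev.toNat
  have hple := pvLen_le_self hp1
  set Dc := (pvDigs cur.toNat).length with hDc
  set Dp := (pvDigs prev.toNat).length with hDp
  have hpow_mono : ∀ {p q : Nat}, p ≤ q → (10:Int)^p ≤ 10^q :=
    fun h => pow_le_pow_right₀ (by norm_num) h
  have hpow_pos : ∀ p : Nat, (0:Int) < 10 ^ p := fun p => pow_pos (by norm_num) p
  by_cases hEq : Dc = Dp
  · rw [if_pos hEq]
    have hstop : cur * 10 ^ 1 + ((10:Int) ^ 1 - 1) > prev := by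
      have h1 : (10:Int) ^ Dc = 10 ^ (Dc - 1) * 10 := by
        conv_lhs => rw [show Dc = (Dc - 1) + 1 by omega]
        rw [pow_succ]
      have h3 : prev < cur * 10 := by
        calc prev < 10 ^ Dp := hpb.2
          _ = (10:Int) ^ Dc := by rw [hEq]
          _ = 10 ^ (Dc - 1) * 10 := h1
          _ ≤ cur * 10 := mul_le_mul_of_nonneg_right hcb.1 (by norm_num)
      omega
    rw [solveAppend_eval prev cur 1 (by omega) (by omega) hstop (prev.toNat + 1) 1 (by omega) (by omega) (by omega)]
    have hlow : cur * 10 ^ 1 > prev := by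
      have h1 : (10:Int) ^ Dc = 10 ^ (Dc - 1) * 10 := by
        conv_lhs => rw [show Dc = (Dc - 1) + 1 by omega]
        rw [pow_succ]
      have h4 : prev < cur * 10 :=
        calc prev < 10 ^ Dp := hpb.2
          _ = (10:Int) ^ Dc := by rw [hEq]
          _ = 10 ^ (Dc - 1) * 10 := h1
          _ ≤ cur * 10 := mul_le_mul_of_nonneg_right hcb.1 (by norm_num)
      simpa using h4
    rw [if_pos hlow]
    rw [pvInt_zero_append]
    have hcc : ((cur.toNat : Int)) = cur := Int.toNat_of_nonneg (by omega)
    rw [hcc]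
    norm_num
  · rw [if_neg hEq]
    have hDlt : Dc < Dp := by omega
    set K := Dp - Dc with hKdef
    have hK1 : 1 ≤ K := by omega
    have hskip : ∀ j, 1 ≤ j → j < K → cur * 10 ^ j + ((10:Int) ^ j - 1) ≤ prev := by
      intro j h1 h2
      have hcu : cur ≤ 10 ^ Dc - 1 := by have := hcb.2; omega
      have e1 : cur * 10 ^ j + ((10:Int)^j - 1) ≤ (10 ^ Dc - 1) * 10 ^ j + (10 ^ j - 1) := by
        nlinarith [hpow_pos j]
      have e2 : ((10:Int) ^ Dc - 1) * 10 ^ j + (10 ^ j - 1) = 10 ^ (Dc + j) - 1 := by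
        rw [pow_add]; ring
      have e3 : (10:Int) ^ (Dc + j) ≤ 10 ^ (Dp - 1) := hpow_mono (by omega)
      have e4 : (10:Int) ^ (Dp - 1) ≤ prev := hpb.1
      omega
    have hKfuel : K < 1 + (prev.toNat + 1) := by omega
    by_cases hA1 : cur * 10 ^ K > prev
    · rw [if_pos hA1]
      have hstop : cur * 10 ^ K + ((10:Int) ^ K - 1) > prev := by
        have := hpow_pos K; omega
      rw [solveAppend_eval prev cur K hK1 hskip hstop (prev.toNat + 1) 1 (by omega) (by omega) (by omega)]
      rw [if_pos hA1]
    · rw [if_neg hA1]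
      rw [pvInt_nines_append]
      have hcc : ((cur.toNat : Int)) = cur := Int.toNat_of_nonneg (by omega)
      rw [hcc]
      by_cases hA2 : cur * 10 ^ K + ((10:Int) ^ K - 1) > prev
      · rw [if_pos hA2]
        rw [solveAppend_eval prev cur K hK1 hskip hA2 (prev.toNat + 1) 1 (by omega) (by omega) (by omega)]
        rw [if_neg hA1]
      · rw [if_neg hA2]
        have hskip' : ∀ j, 1 ≤ j → j < K + 1 → cur * 10 ^ j + ((10:Int) ^ j - 1) ≤ prev := by
          intro j h1 h2
          by_cases hjK : j = K
          · subst hjK; omega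
          · exact hskip j h1 (by omega)
        have hlow' : cur * 10 ^ (K + 1) > prev := by
          have e1 : (10:Int) ^ (Dc - 1) * 10 ^ (K + 1) ≤ cur * 10 ^ (K + 1) := by
            exact mul_le_mul_of_nonneg_right hcb.1 (le_of_lt (hpow_pos (K + 1)))
          have e2 : (10:Int) ^ (Dc - 1) * 10 ^ (K + 1) = 10 ^ (Dc - 1 + (K + 1)) :=
            (pow_add 10 (Dc - 1) (K + 1)).symm
          have e3 : Dc - 1 + (K + 1) = Dp := by omega
          have e4 : prev < 10 ^ Dp := hpb.2
          rw [e3] at e2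
          omega
        have hstop' : cur * 10 ^ (K + 1) + ((10:Int) ^ (K + 1) - 1) > prev := by
          have := hpow_pos (K + 1); omega
        have hK1fuel : K + 1 < 1 + (prev.toNat + 1) := by
          have : (K : Int) + 1 ≤ Dp := by omega
          omega
        rw [solveAppend_eval prev cur (K + 1) (by omega) hskip' hstop' (prev.toNat + 1) 1 (by omega) (by omega) (by omega)]
        rw [if_pos hlow']

theorem step_eq (xs : List Int) (r : Int) (m : Nat) (hm : 1 ≤ m) (hlen : m < xs.length)
    (hcur : 1 ≤ xs.getD m 0) (hprev : 1 ≤ xs.getD (m - 1) 0) :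
    solveStepA (xs, r) (m : Int) = solveStepB (xs, r) (m : Int) ∧
    ∃ v : Int, 1 ≤ v ∧ (solveStepA (xs, r) (m : Int)).1 = xs.set m v := by
  have hm0 : ((m : Int) - 1) = ((m - 1 : Nat) : Int) := by omega
  simp only [solveStepA, solveStepB, hm0, PySem.List.pyGetD_natCast, PySem.List.pySetD_natCast]
  set cur := xs.getD m 0 with hcurdef
  set prev := xs.getD (m - 1) 0 with hprevdef
  by_cases hle : cur ≤ prev
  · rw [if_pos hle, if_pos hle]
    rw [pvToChars_nonneg (by omega : (0:Int) ≤ cur), pvToChars_nonneg (by omega : (0:Int) ≤ prev)]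
    rw [inner_eq prev cur hcur hle]
    have hcc : ((cur.toNat : Int)) = cur := Int.toNat_of_nonneg (by omega)
    have hpow_pos : ∀ p : Nat, (0:Int) < 10 ^ p := fun p => pow_pos (by norm_num) p
    by_cases hEq : (pvDigs cur.toNat).length = (pvDigs prev.toNat).length
    · rw [if_pos hEq, if_pos hEq]
      refine ⟨by norm_num, pvInt (pvDigs cur.toNat ++ ['0']), ?_, rfl⟩
      rw [pvInt_zero_append, hcc]
      nlinarith
    · rw [if_neg hEq, if_neg hEq]
      set K := (pvDigs prev.toNat).length - (pvDigs cur.toNat).length with hK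
      by_cases hA1 : cur * 10 ^ K > prev
      · rw [if_pos hA1, if_pos hA1]
        exact ⟨rfl, cur * 10 ^ K, by nlinarith [hpow_pos K], rfl⟩
      · rw [if_neg hA1, if_neg hA1]
        by_cases hA2 : pvInt (pvDigs cur.toNat ++ List.replicate K '9') > prev
        · rw [if_pos hA2, if_pos hA2]
          exact ⟨rfl, prev + 1, by omega, rfl⟩
        · rw [if_neg hA2, if_neg hA2]
          refine ⟨?_, cur * 10 ^ (K + 1), by nlinarith [hpow_pos (K + 1)], rfl⟩
          push_cast
          rw [add_assoc]
  · rw [if_neg hle, if_neg hle]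
    refine ⟨rfl, cur, hcur, ?_⟩
    rw [hcurdef, List.getD_eq_getElem xs 0 hlen]
    exact (List.set_getElem_self hlen).symm

theorem fold_eq (t : Nat) (ht : 1 ≤ t) : ∀ (xs : List Int) (r : Int),
    (t ≤ xs.length) → (∀ j < t, 1 ≤ xs.getD j 0) →
    (PySem.List.pyRange 1 (t : Int)).foldl solveStepA (xs, r)
      = (PySem.List.pyRange 1 (t : Int)).foldl solveStepB (xs, r) ∧
    ((PySem.List.pyRange 1 (t : Int)).foldl solveStepA (xs, r)).1.length = xs.length ∧
    (∀ j < t, 1 ≤ ((PySem.List.pyRange 1 (t : Int)).foldl solveStepA (xs, r)).1.getD j 0) ∧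
    (∀ j, t ≤ j → ((PySem.List.pyRange 1 (t : Int)).foldl solveStepA (xs, r)).1.getD j 0 = xs.getD j 0) := by
  induction t with
  | zero => omega
  | succ t ih =>
    intro xs r hlen hpos
    by_cases ht1 : t = 0
    · subst ht1
      have hr : PySem.List.pyRange 1 ((0 + 1 : Nat) : Int) = [] := by
        apply List.eq_nil_iff_forall_not_mem.2
        intro i hi
        have h2 := PySem.List.mem_pyRange_one.1 hi
        have h3 : ((0 + 1 : Nat) : Int) = 1 := by norm_num
        omega
      rw [hr]
      simp only [List.foldl_nil]
      refine ⟨trivial, trivial, ?_, ?_⟩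
      · exact fun j hj => hpos j hj
      · exact fun j hj => trivial
    · have ht' : 1 ≤ t := by omega
      have hcast : ((t + 1 : Nat) : Int) = (t : Int) + 1 := by push_cast; ring
      rw [hcast, PySem.List.pyRange_one_succ_right (by omega : (1:Int) ≤ (t:Int))]
      rw [List.foldl_append, List.foldl_append]
      obtain ⟨hAB, hL, hpos', huntouch⟩ := ih ht' xs r (by omega) (fun j hj => hpos j (by omega))
      set S := (PySem.List.pyRange 1 (t : Int)).foldl solveStepA (xs, r) with hS
      have hSpair : S = (S.1, S.2) := rfl
      have hstep := step_eq S.1 S.2 t ht' (by omega)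
        (by rw [huntouch t (le_refl t)]; exact hpos t (by omega))
        (hpos' (t - 1) (by omega))
      obtain ⟨hstepEq, v, hv1, hvset⟩ := hstep
      rw [← hAB]
      rw [List.foldl_cons, List.foldl_nil, List.foldl_cons, List.foldl_nil]
      rw [← hSpair] at hstepEq hvset
      refine ⟨hstepEq, ?_, ?_, ?_⟩
      · rw [hvset, List.length_set, hL]
      · intro j hj
        rw [hvset]
        by_cases hjt : j = t
        · subst hjt
          have hgv : (S.1.set j v).getD j 0 = v := by
            rw [List.getD_eq_getElem?_getD, List.getElem?_set]
            rw [if_pos rfl, if_pos (by omega : j < S.1.length)]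
            rfl
          rw [hgv]
          exact hv1
        · have : (S.1.set t v).getD j 0 = S.1.getD j 0 := by
            rw [List.getD_eq_getElem?_getD, List.getD_eq_getElem?_getD, List.getElem?_set]
            rw [if_neg (fun h => hjt h.symm)]
          rw [this]
          exact hpos' j (by omega)
      · intro j hj
        rw [hvset]
        have : (S.1.set t v).getD j 0 = S.1.getD j 0 := by
          rw [List.getD_eq_getElem?_getD, List.getD_eq_getElem?_getD, List.getElem?_set]
          rw [if_neg (by omega : ¬ t = j)]
        rw [this]
        exact huntouch j (by omega)

-- ===== VERDICT (by name: the statement is the Claim_ definition above) =====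
theorem solve_spec : Claim_equal_solve := by
  intro n x _hdom hpre
  unfold Spec_solve solve solve_alt
  rcases hpre with hn | ⟨hlen, hpos⟩
  · have hr : PySem.List.pyRange 1 n = [] := by
      apply List.eq_nil_iff_forall_not_mem.2
      intro i hi
      have := PySem.List.mem_pyRange_one.1 hi
      omega
    simp [hr]
  · by_cases hn1 : n ≤ 1
    · have hr : PySem.List.pyRange 1 n = [] := by
        apply List.eq_nil_iff_forall_not_mem.2
        intro i hi
        have := PySem.List.mem_pyRange_one.1 hi
        omega
      simp [hr]
    · have ht : n = (n.toNat : Int) := by omega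
      have h1 : 1 ≤ n.toNat := by omega
      have h2 : n.toNat ≤ x.length := by omega
      rw [ht]
      rw [(fold_eq n.toNat h1 x 0 h2 hpos).1]
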